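-- pv_equiv track=rewrite | github.com/Hawaii-Bioinformatics/ViralEmbed | pair_ranking/pair_ranking_script.py | get_results_dic
-- ===== SOURCE A (Python) =====
-- def get_results_dic(all_top_pairs_nc) :
--     results_nc = {}
--     for item in all_top_pairs_nc :
--         key = item[2]
--         score = item[1]
--         if key in results_nc:
--             results_nc[key] = (results_nc[key][0] + 1, results_nc[key][1] + score)
--         else:
--             results_nc[key] = (1, score)
--     return results_nc
-- ===== SOURCE B (Python) =====
-- def get_results_dic(all_top_pairs_nc):
--     # Phase 1: group scores by key, preserving first-seen key order.
--     groups = {}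
--     for item in all_top_pairs_nc:
--         groups.setdefault(item[2], []).append(item[1])
--     # Phase 2: reduce each group to (count, sum of scores).
--     return {key: (len(scores), sum(scores)) for key, scores in groups.items()}
-- ===== Notes on version B (the rewrite author's own statement) =====
-- stated objective: alternative
-- what changed: Replaces A's single-pass fold over running (count,sum) pairs by a two-phase group-then-reduce: first collect each key's scores into a list, then map each group to (len, sum).
import Mathlib
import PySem

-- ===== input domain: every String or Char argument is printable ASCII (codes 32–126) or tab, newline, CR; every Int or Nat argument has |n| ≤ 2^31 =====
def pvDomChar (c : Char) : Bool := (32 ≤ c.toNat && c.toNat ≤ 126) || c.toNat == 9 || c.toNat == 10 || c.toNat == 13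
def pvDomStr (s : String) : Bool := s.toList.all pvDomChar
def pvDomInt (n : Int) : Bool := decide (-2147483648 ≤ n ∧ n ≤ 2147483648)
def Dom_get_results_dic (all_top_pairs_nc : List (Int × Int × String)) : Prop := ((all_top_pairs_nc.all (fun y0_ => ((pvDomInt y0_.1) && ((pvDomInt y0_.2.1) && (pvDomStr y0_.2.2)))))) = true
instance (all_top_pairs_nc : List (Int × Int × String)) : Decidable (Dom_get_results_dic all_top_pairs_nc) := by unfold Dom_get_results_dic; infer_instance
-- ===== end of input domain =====

-- B replaces A's single-pass fold over running (count,sum) pairs by a two-phase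
-- group-then-reduce (collect each key's scores, then map each group to (len, sum)); alternative decomposition, same cost.

-- ===== PORT A =====
-- A's 'results_nc[key]' lookups under 'key in results_nc' are ported as getD (the key is present there, so the default is never used).
def get_results_dic (all_top_pairs_nc : List (Int × Int × String)) : List (String × Int × Int) :=
  (all_top_pairs_nc.foldl
    (fun d item =>
      if d.contains item.2.2 then
        d.insert item.2.2 ((d.getD item.2.2 (0, 0)).1 + 1, (d.getD item.2.2 (0, 0)).2 + item.2.1)
      else
        d.insert item.2.2 (1, item.2.1))
    PySem.Dict.empty).items

-- ===== PORT B =====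
-- 'groups.setdefault(item[2], []).append(item[1])' = groups[k] = groups.get(k, []) + [item[1]] = Dict.modify (exact).
def get_results_dic_alt (all_top_pairs_nc : List (Int × Int × String)) : List (String × Int × Int) :=
  (all_top_pairs_nc.foldl
    (fun g item => g.modify item.2.2 [] (fun v => v ++ [item.2.1]))
    PySem.Dict.empty).items.map (fun p => (p.1, ((p.2.length : Int), p.2.foldl (· + ·) 0)))

-- ===== PRECONDITION & SPEC =====
def Spec_get_results_dic (all_top_pairs_nc : List (Int × Int × String)) (out : List (String × Int × Int)) : Prop := out = get_results_dic_alt all_top_pairs_nc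
instance (all_top_pairs_nc : List (Int × Int × String)) (out : List (String × Int × Int)) : Decidable (Spec_get_results_dic all_top_pairs_nc out) := by unfold Spec_get_results_dic; infer_instance

-- ===== CLAIM (what is proved, stated in full; the proofs are below) =====
def Claim_equal_get_results_dic : Prop := ∀ (all_top_pairs_nc : List (Int × Int × String)), Dom_get_results_dic all_top_pairs_nc → Spec_get_results_dic all_top_pairs_nc (get_results_dic all_top_pairs_nc)

-- ===== LEMMAS AND PROOFS =====

-- A's loop step, written as a single insert (needed for the keys_foldl_insert_key lemma).
lemma stepA_eq_insert :
    (fun (d : PySem.Dict String (Int × Int)) (item : Int × Int × String) =>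
      if d.contains item.2.2 then
        d.insert item.2.2 ((d.getD item.2.2 (0, 0)).1 + 1, (d.getD item.2.2 (0, 0)).2 + item.2.1)
      else
        d.insert item.2.2 (1, item.2.1))
    = (fun d item =>
        d.insert item.2.2
          (if d.contains item.2.2 then
            ((d.getD item.2.2 (0, 0)).1 + 1, (d.getD item.2.2 (0, 0)).2 + item.2.1)
          else (1, item.2.1))) := by
  funext d item; split <;> rfl

-- closed form for A's accumulated value at a key c
lemma A_getD (l : List (Int × Int × String)) (d : PySem.Dict String (Int × Int)) (c : String) :
    (l.foldl
      (fun d item =>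
        if d.contains item.2.2 then
          d.insert item.2.2 ((d.getD item.2.2 (0, 0)).1 + 1, (d.getD item.2.2 (0, 0)).2 + item.2.1)
        else
          d.insert item.2.2 (1, item.2.1)) d).getD c (0, 0)
    = ((d.getD c (0, 0)).1 + ((l.filter (fun p => p.2.2 == c)).map (·.2.1)).length,
       ((l.filter (fun p => p.2.2 == c)).map (·.2.1)).foldl (· + ·) (d.getD c (0, 0)).2) := by
  induction l generalizing d with
  | nil => simp
  | cons p l ih =>
    simp only [List.foldl_cons, ih]
    by_cases hc : p.2.2 = c
    · subst hc
      by_cases h : d.contains p.2.2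
      · simp only [h, if_true, PySem.Dict.getD_insert_self, List.filter_cons,
          beq_self_eq_true, List.map_cons, List.length_cons, List.foldl_cons, Prod.mk.injEq]
        exact ⟨by push_cast; ring, trivial⟩
      · rw [if_neg (by simp [h])]
        rw [PySem.Dict.getD_of_not_contains d _ (by simpa using h)]
        simp only [PySem.Dict.getD_insert_self, List.filter_cons, beq_self_eq_true,
          if_true, List.map_cons, List.length_cons, List.foldl_cons, Prod.mk.injEq]
        exact ⟨by push_cast; ring, by norm_num⟩
    · have hne : c ≠ p.2.2 := fun h => hc h.symm
      have hbe : (p.2.2 == c) = false := by simpa using hc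
      simp only [List.filter_cons, hbe, Bool.false_eq_true, if_false]
      split
      · rw [PySem.Dict.getD_insert_of_ne d _ _ hne]
      · rw [PySem.Dict.getD_insert_of_ne d _ _ hne]

-- ===== VERDICT (by name: the statement is the Claim_ definition above) =====
theorem get_results_dic_spec : Claim_equal_get_results_dic := by
  intro l _
  unfold Spec_get_results_dic get_results_dic get_results_dic_alt
  rw [stepA_eq_insert]
  have hA_nodup : (List.foldl (fun (d : PySem.Dict String (Int × Int)) item =>
      d.insert item.2.2
        (if d.contains item.2.2 then
          ((d.getD item.2.2 (0, 0)).1 + 1, (d.getD item.2.2 (0, 0)).2 + item.2.1)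
        else (1, item.2.1))) PySem.Dict.empty l).keys.Nodup :=
    PySem.Dict.nodup_keys_foldl_insert_key l (fun it => it.2.2) _ PySem.Dict.empty
      PySem.Dict.nodup_keys_empty
  have hB_nodup : (List.foldl (fun (g : PySem.Dict String (List Int)) item =>
      g.modify item.2.2 [] (fun v => v ++ [item.2.1])) PySem.Dict.empty l).keys.Nodup :=
    PySem.Dict.nodup_keys_foldl_modify_key l (fun it => it.2.2) [] _ PySem.Dict.empty
      PySem.Dict.nodup_keys_empty
  rw [PySem.Dict.items_eq_map_keys _ hA_nodup (0, 0),
      PySem.Dict.items_eq_map_keys _ hB_nodup []]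
  rw [PySem.Dict.keys_foldl_insert_key, PySem.Dict.keys_foldl_modify_key]
  rw [List.map_map]
  refine List.map_congr_left ?_
  intro k _
  have hB : (l.foldl (fun g item => g.modify item.2.2 [] fun v => v ++ [item.2.1])
      PySem.Dict.empty).getD k []
      = (l.filter (fun p => p.2.2 == k)).map (·.2.1) := by
    have h1 : l.foldl (fun g item => g.modify item.2.2 [] fun v => v ++ [item.2.1])
        PySem.Dict.empty
        = (l.map (fun it => (it.2.2, it.2.1))).foldl
            (fun d p => d.modify p.1 [] fun v => v ++ [p.2]) PySem.Dict.empty := by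
      rw [List.foldl_map]
    rw [h1, PySem.Dict.getD_foldl_modify_append]
    simp [List.filter_map, Function.comp_def, List.map_map]
  simp only [Function.comp_apply, hB]
  rw [← stepA_eq_insert, A_getD l PySem.Dict.empty k]
  simp [PySem.Dict.getD_empty]
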